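-- pv_equiv track=rewrite | github.com/alanusp/a | scripts/openapi_diff.py | _classify_diff
-- ===== SOURCE A (Python) =====
-- from typing import Dict
--
-- def _classify_diff(baseline: Dict[str, str], current: Dict[str, str]) -> Dict[str, list[str]]:
--     baseline_keys = set(baseline)
--     current_keys = set(current)
--     added = sorted(current_keys - baseline_keys)
--     removed = sorted(baseline_keys - current_keys)
--     modified = sorted(
--         key
--         for key in baseline_keys & current_keys
--         if baseline[key] != current[key]
--     )
--     return {"added": added, "removed": removed, "modified": modified}
-- ===== SOURCE B (Python) =====
-- from typing import Dict
--
-- def _classify_diff(baseline: Dict[str, str], current: Dict[str, str]) -> Dict[str, list[str]]: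
--     bkeys = sorted(baseline)
--     ckeys = sorted(current)
--     added, removed, modified = [], [], []
--     i = j = 0
--     while i < len(bkeys) and j < len(ckeys):
--         bk, ck = bkeys[i], ckeys[j]
--         if bk < ck:
--             removed.append(bk)
--             i += 1
--         elif ck < bk:
--             added.append(ck)
--             j += 1
--         else:
--             if baseline[bk] != current[ck]:
--                 modified.append(bk)
--             i += 1
--             j += 1
--     removed.extend(bkeys[i:])
--     added.extend(ckeys[j:])
--     return {"added": added, "removed": removed, "modified": modified}
-- ===== Notes on version B (the rewrite author's own statement) =====
-- stated objective: alternative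
-- what changed: B sorts the two key lists once and classifies keys with a two-pointer merge of the sorted lists (smaller head is removed/added, equal heads are compared for modification), so the three result lists come out already sorted and no set differences/intersection or per-list sorts are computed.
import Mathlib
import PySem

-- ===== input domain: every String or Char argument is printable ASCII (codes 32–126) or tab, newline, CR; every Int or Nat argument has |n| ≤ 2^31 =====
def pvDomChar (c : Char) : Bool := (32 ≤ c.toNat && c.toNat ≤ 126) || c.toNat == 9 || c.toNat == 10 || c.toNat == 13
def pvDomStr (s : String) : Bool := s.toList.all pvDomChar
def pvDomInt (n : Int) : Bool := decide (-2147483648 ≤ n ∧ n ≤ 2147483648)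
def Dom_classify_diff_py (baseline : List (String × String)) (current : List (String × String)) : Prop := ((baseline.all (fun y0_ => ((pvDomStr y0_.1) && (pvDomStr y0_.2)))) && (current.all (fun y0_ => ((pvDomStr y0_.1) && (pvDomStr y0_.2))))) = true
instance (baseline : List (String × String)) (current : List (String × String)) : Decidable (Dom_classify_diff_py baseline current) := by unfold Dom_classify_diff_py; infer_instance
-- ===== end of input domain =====

-- B classifies keys by a two-pointer merge of the two sorted key lists instead of
-- set differences/intersection plus per-list sorts (alternative algorithm, same cost).


-- ===== PORT A =====
-- the dict arguments arrive as assoc lists; PySem.Dict.ofList materialises them with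
-- Python's dict semantics (insertion order, later value overwrites)
def classify_diff_py (baseline : List (String × String)) (current : List (String × String)) : List (String × List String) :=
  let b := PySem.Dict.ofList baseline
  let c := PySem.Dict.ofList current
  let baseline_keys : PySem.Set String := PySem.Set.ofList b.keys
  let current_keys : PySem.Set String := PySem.Set.ofList c.keys
  let added := PySem.List.sorted (PySem.Set.diff current_keys baseline_keys) (fun x => x) false
  let removed := PySem.List.sorted (PySem.Set.diff baseline_keys current_keys) (fun x => x) false
  let modified := PySem.List.sorted
    ((PySem.Set.inter baseline_keys current_keys).filter (fun k => b.getD k "" != c.getD k "")) (fun x => x) false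
  [("added", added), ("removed", removed), ("modified", modified)]

-- ===== PORT B =====
-- B's while loop over the two index pointers, as the obvious structural recursion on the
-- two list suffixes; returns (added, removed, modified)
def pvMerge (b c : PySem.Dict String String) :
    List String → List String → List String × List String × List String
  | [], cs => (cs, [], [])
  | bk :: bs, [] => ([], bk :: bs, [])
  | bk :: bs, ck :: cs =>
    if bk < ck then
      let r := pvMerge b c bs (ck :: cs)
      (r.1, bk :: r.2.1, r.2.2)
    else if ck < bk then
      let r := pvMerge b c (bk :: bs) cs
      (ck :: r.1, r.2.1, r.2.2)
    else
      let r := pvMerge b c bs cs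
      if b.getD bk "" != c.getD ck "" then (r.1, r.2.1, bk :: r.2.2) else r

def classify_diff_py_alt (baseline : List (String × String)) (current : List (String × String)) : List (String × List String) :=
  let b := PySem.Dict.ofList baseline
  let c := PySem.Dict.ofList current
  let bkeys := PySem.List.sorted b.keys (fun x => x) false
  let ckeys := PySem.List.sorted c.keys (fun x => x) false
  let res := pvMerge b c bkeys ckeys
  [("added", res.1), ("removed", res.2.1), ("modified", res.2.2)]

-- ===== PRECONDITION & SPEC =====
def Spec_classify_diff_py (baseline : List (String × String)) (current : List (String × String)) (out : List (String × List String)) : Prop := out = classify_diff_py_alt baseline current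
instance (baseline : List (String × String)) (current : List (String × String)) (out : List (String × List String)) : Decidable (Spec_classify_diff_py baseline current out) := by unfold Spec_classify_diff_py; infer_instance

-- ===== CLAIM (what is proved, stated in full; the proofs are below) =====
def Claim_equal_classify_diff_py : Prop := ∀ (baseline : List (String × String)) (current : List (String × String)), Dom_classify_diff_py baseline current → Spec_classify_diff_py baseline current (classify_diff_py baseline current)

-- ===== LEMMAS AND PROOFS =====

theorem pvContains_false {l : List String} {a : String} (h : a ∉ l) : l.contains a = false := by
  rw [Bool.eq_false_iff]
  intro hc
  exact h (List.contains_iff_mem.mp hc)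

theorem pvContains_perm {l m : List String} (h : l.Perm m) (a : String) :
    l.contains a = m.contains a := by
  by_cases hm : a ∈ m
  · have : a ∈ l := h.mem_iff.mpr hm
    rw [List.contains_iff_mem.mpr this, List.contains_iff_mem.mpr hm]
  · rw [pvContains_false hm, pvContains_false (fun hx => hm (h.mem_iff.mp hx))]

-- dropping a head the filtered list cannot contain from a membership test
theorem pvFilter_drop_head {l : List String} {a : String} {t : List String}
    (h : ∀ k ∈ l, k ≠ a) (p : Bool → Bool) :
    l.filter (fun k => p ((a :: t).contains k)) = l.filter (fun k => p (t.contains k)) := by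
  apply List.filter_congr
  intro k hk
  have : (k == a) = false := beq_eq_false_iff_ne.mpr (h k hk)
  rw [List.contains_cons, this, Bool.false_or]

-- the merge of two strictly increasing lists is the three classifying filters
theorem pvMerge_spec (b c : PySem.Dict String String) (bs cs : List String)
    (hb : bs.Pairwise (· < ·)) (hc : cs.Pairwise (· < ·)) :
    pvMerge b c bs cs =
      (cs.filter (fun k => !bs.contains k),
       bs.filter (fun k => !cs.contains k),
       bs.filter (fun k => cs.contains k && (b.getD k "" != c.getD k ""))) := by
  induction bs generalizing cs with
  | nil => cases cs <;> simp [pvMerge]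
  | cons bk bs ih =>
    induction cs with
    | nil => simp [pvMerge]
    | cons ck cs ihc =>
      have hbk : ∀ y ∈ bs, bk < y := fun y hy => (List.pairwise_cons.mp hb).1 y hy
      have hck : ∀ y ∈ cs, ck < y := fun y hy => (List.pairwise_cons.mp hc).1 y hy
      have hb' : bs.Pairwise (· < ·) := (List.pairwise_cons.mp hb).2
      have hc' : cs.Pairwise (· < ·) := (List.pairwise_cons.mp hc).2
      by_cases h1 : bk < ck
      · -- bk goes to removed; bk is below everything in ck :: cs
        have hnot : ∀ k ∈ ck :: cs, k ≠ bk := by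
          intro k hk he
          subst he
          rcases List.mem_cons.mp hk with rfl | hk'
          · exact lt_irrefl _ h1
          · exact lt_irrefl _ (lt_trans h1 (hck _ hk'))
        have hbknotc : ((ck :: cs).contains bk) = false :=
          pvContains_false (fun hm => hnot bk hm rfl)
        rw [pvMerge, if_pos h1, ih (ck :: cs) hb' hc]
        rw [pvFilter_drop_head (t := bs) hnot (fun x => !x)]
        rw [show ∀ q : String → Bool, (bk :: bs).filter q = if q bk then bk :: bs.filter q else bs.filter q from fun q => List.filter_cons,
            show ∀ q : String → Bool, (bk :: bs).filter q = if q bk then bk :: bs.filter q else bs.filter q from fun q => List.filter_cons]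
        rw [hbknotc]
        simp
      · by_cases h2 : ck < bk
        · -- ck goes to added; ck is below everything in bk :: bs
          have hnot : ∀ k ∈ bk :: bs, k ≠ ck := by
            intro k hk he
            subst he
            rcases List.mem_cons.mp hk with rfl | hk'
            · exact lt_irrefl _ h2
            · exact lt_irrefl _ (lt_trans h2 (hbk _ hk'))
          have hcknotb : ((bk :: bs).contains ck) = false :=
            pvContains_false (fun hm => hnot ck hm rfl)
          rw [pvMerge, if_neg h1, if_pos h2, ihc hc']
          rw [show (ck :: cs).filter (fun k => !(bk :: bs).contains k)
                = if !(bk :: bs).contains ck then ck :: cs.filter (fun k => !(bk :: bs).contains k)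
                  else cs.filter (fun k => !(bk :: bs).contains k) from List.filter_cons]
          rw [hcknotb]
          simp only [Bool.not_false, if_true]
          rw [pvFilter_drop_head (t := cs) hnot (fun x => !x)]
          have hm : (bk :: bs).filter (fun k => (ck :: cs).contains k && (b.getD k "" != c.getD k ""))
              = (bk :: bs).filter (fun k => cs.contains k && (b.getD k "" != c.getD k "")) := by
            apply List.filter_congr
            intro k hk
            have : (k == ck) = false := beq_eq_false_iff_ne.mpr (hnot k hk)
            rw [List.contains_cons, this, Bool.false_or]
          rw [hm]
        · -- heads equal: compare the two values
          have heq : bk = ck := le_antisymm (not_lt.mp h2) (not_lt.mp h1)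
          subst heq
          have hnotc : ∀ k ∈ cs, k ≠ bk := by
            intro k hk he; subst he; exact lt_irrefl _ (hck _ hk)
          have hnotb : ∀ k ∈ bs, k ≠ bk := by
            intro k hk he; subst he; exact lt_irrefl _ (hbk _ hk)
          have hbin : ((bk :: bs).contains bk) = true :=
            List.contains_iff_mem.mpr (List.mem_cons_self)
          have hcin : ((bk :: cs).contains bk) = true :=
            List.contains_iff_mem.mpr (List.mem_cons_self)
          rw [pvMerge, if_neg h1, if_neg h2, ih cs hb' hc']
          rw [show (bk :: cs).filter (fun k => !(bk :: bs).contains k)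
                = if !(bk :: bs).contains bk then bk :: cs.filter (fun k => !(bk :: bs).contains k)
                  else cs.filter (fun k => !(bk :: bs).contains k) from List.filter_cons]
          rw [hbin]
          simp only [Bool.not_true]
          rw [pvFilter_drop_head (t := bs) hnotc (fun x => !x)]
          rw [show ∀ q : String → Bool, (bk :: bs).filter q = if q bk then bk :: bs.filter q else bs.filter q from fun q => List.filter_cons,
              show ∀ q : String → Bool, (bk :: bs).filter q = if q bk then bk :: bs.filter q else bs.filter q from fun q => List.filter_cons]
          rw [hcin]
          have hfr : bs.filter (fun k => !(bk :: cs).contains k) = bs.filter (fun k => !cs.contains k) :=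
            pvFilter_drop_head (t := cs) hnotb (fun x => !x)
          have hfm : bs.filter (fun k => (bk :: cs).contains k && (b.getD k "" != c.getD k ""))
              = bs.filter (fun k => cs.contains k && (b.getD k "" != c.getD k "")) := by
            apply List.filter_congr
            intro k hk
            have : (k == bk) = false := beq_eq_false_iff_ne.mpr (hnotb k hk)
            rw [List.contains_cons, this, Bool.false_or]
          rw [hfr, hfm]
          by_cases hd : (b.getD bk "" != c.getD bk "") = true
          · simp [hd]
          · have hd' : (b.getD bk "" != c.getD bk "") = false := by
              rw [Bool.eq_false_iff]; exact hd
            simp [hd']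

-- ===== VERDICT (by name: the statement is the Claim_ definition above) =====
theorem classify_diff_py_spec : Claim_equal_classify_diff_py := by
  intro baseline current _
  unfold Spec_classify_diff_py classify_diff_py classify_diff_py_alt
  dsimp only
  set b := PySem.Dict.ofList baseline with hbdef
  set c := PySem.Dict.ofList current with hcdef
  set bs := PySem.List.sorted b.keys (fun x => x) false with hbs
  set cs := PySem.List.sorted c.keys (fun x => x) false with hcs
  have hBnd : b.keys.Nodup := PySem.Dict.nodup_keys_ofList baseline
  have hCnd : c.keys.Nodup := PySem.Dict.nodup_keys_ofList current
  have hbp : bs.Perm b.keys := PySem.List.sorted_perm ..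
  have hcp : cs.Perm c.keys := PySem.List.sorted_perm ..
  have hbsN : bs.Nodup := (hbp.nodup_iff).mpr hBnd
  have hcsN : cs.Nodup := (hcp.nodup_iff).mpr hCnd
  have hbsS : bs.Pairwise (· < ·) := by
    have h1 : bs.Pairwise (· ≤ ·) := PySem.List.sorted_pairwise ..
    exact (List.Pairwise.and h1 hbsN).imp (fun {x y} h => lt_of_le_of_ne h.1 h.2)
  have hcsS : cs.Pairwise (· < ·) := by
    have h1 : cs.Pairwise (· ≤ ·) := PySem.List.sorted_pairwise ..
    exact (List.Pairwise.and h1 hcsN).imp (fun {x y} h => lt_of_le_of_ne h.1 h.2)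
  have hB : PySem.Set.ofList b.keys = b.keys := PySem.Set.ofList_eq_self_of_nodup _ hBnd
  have hC : PySem.Set.ofList c.keys = c.keys := PySem.Set.ofList_eq_self_of_nodup _ hCnd
  rw [pvMerge_spec b c bs cs hbsS hcsS]
  -- added
  have hadded : PySem.List.sorted (PySem.Set.diff (PySem.Set.ofList c.keys) (PySem.Set.ofList b.keys)) (fun x => x) false
      = cs.filter (fun k => !bs.contains k) := by
    rw [hB, hC]
    apply PySem.List.sorted_eq_of_perm_of_pairwise_lt
    · have h0 : PySem.Set.diff c.keys b.keys = c.keys.filter (fun k => !b.keys.contains k) := rfl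
      rw [h0]
      refine List.Perm.trans ?_ (hcp.filter (fun k => !b.keys.contains k))
      rw [List.filter_congr (fun k _ => by rw [pvContains_perm hbp])]
    · exact hcsS.filter _
  -- removed
  have hremoved : PySem.List.sorted (PySem.Set.diff (PySem.Set.ofList b.keys) (PySem.Set.ofList c.keys)) (fun x => x) false
      = bs.filter (fun k => !cs.contains k) := by
    rw [hB, hC]
    apply PySem.List.sorted_eq_of_perm_of_pairwise_lt
    · have h0 : PySem.Set.diff b.keys c.keys = b.keys.filter (fun k => !c.keys.contains k) := rfl
      rw [h0]
      refine List.Perm.trans ?_ (hbp.filter (fun k => !c.keys.contains k))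
      rw [List.filter_congr (fun k _ => by rw [pvContains_perm hcp])]
    · exact hbsS.filter _
  -- modified
  have hmodified : PySem.List.sorted ((PySem.Set.inter (PySem.Set.ofList b.keys) (PySem.Set.ofList c.keys)).filter (fun k => b.getD k "" != c.getD k "")) (fun x => x) false
      = bs.filter (fun k => cs.contains k && (b.getD k "" != c.getD k "")) := by
    rw [hB, hC]
    apply PySem.List.sorted_eq_of_perm_of_pairwise_lt
    · have h0 : (PySem.Set.inter b.keys c.keys).filter (fun k => b.getD k "" != c.getD k "")
          = b.keys.filter (fun k => c.keys.contains k && (b.getD k "" != c.getD k "")) := by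
        show (List.filter _ (List.filter _ _)) = _
        rw [List.filter_filter]
        apply List.filter_congr
        intro k _
        rw [Bool.and_comm]
        rfl
      rw [h0]
      refine List.Perm.trans ?_ (hbp.filter (fun k => c.keys.contains k && (b.getD k "" != c.getD k "")))
      rw [List.filter_congr (fun k _ => by rw [pvContains_perm hcp])]
    · exact hbsS.filter _
  simp only [hadded, hremoved, hmodified]
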